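-- pv_equiv track=rewrite | github.com/RickyL-2000/ROSVOT | tasks/rosvot/rosvot_utils.py | bd_to_durs
-- ===== SOURCE A (Python) =====
-- def bd_to_durs(bd):
--     # bd [T]
--     last_idx = 0
--     durs = []
--     for idx in range(len(bd)):
--         if bd[idx] == 1:
--             durs.append(idx - last_idx)
--             last_idx = idx
--     durs.append(len(bd) - last_idx)
--     return durs
-- ===== SOURCE B (Python) =====
-- def bd_to_durs(bd):
--     # positions of all segment boundaries, framed by 0 and len(bd);
--     # durations are the differences of consecutive positions
--     positions = [0] + [i for i in range(len(bd)) if bd[i] == 1] + [len(bd)]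
--     return [b - a for a, b in zip(positions, positions[1:])]
-- ===== Notes on version B (the rewrite author's own statement) =====
-- stated objective: alternative
-- what changed: Replaces the single accumulating loop carrying last_idx with two passes: build the explicit list of boundary positions framed by zero and the length, then diff consecutive neighbours via zip.
import Mathlib
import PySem

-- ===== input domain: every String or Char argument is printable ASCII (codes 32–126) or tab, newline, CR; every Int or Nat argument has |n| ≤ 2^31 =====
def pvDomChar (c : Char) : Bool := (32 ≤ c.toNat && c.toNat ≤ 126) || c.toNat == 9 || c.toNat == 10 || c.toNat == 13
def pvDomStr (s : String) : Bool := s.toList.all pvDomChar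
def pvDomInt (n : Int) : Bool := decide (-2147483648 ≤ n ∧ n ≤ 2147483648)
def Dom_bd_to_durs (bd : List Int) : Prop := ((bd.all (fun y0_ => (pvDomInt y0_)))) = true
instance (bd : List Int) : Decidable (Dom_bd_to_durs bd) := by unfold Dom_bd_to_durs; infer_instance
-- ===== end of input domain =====

-- B replaces A's accumulating loop (carrying last_idx) by an explicit boundary-position
-- list of boundary positions (framed by zero and the length) followed by a neighbour-difference pass (objective: alternative).

-- ===== PORT A =====
def bd_to_durs (bd : List Int) : List Int :=
  let n : Int := bd.length
  let st :=
    (PySem.List.pyRange 0 n 1).foldl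
      (fun (s : Int × List Int) idx =>
        if PySem.List.pyGet? bd idx = some 1 then (idx, s.2 ++ [idx - s.1]) else s)
      (0, [])
  st.2 ++ [n - st.1]

-- ===== PORT B =====
def bd_to_durs_alt (bd : List Int) : List Int :=
  let n : Int := bd.length
  let positions : List Int :=
    0 :: ((PySem.List.pyRange 0 n 1).filter (fun i => PySem.List.pyGet? bd i = some 1) ++ [n])
  -- [b - a for a, b in zip(positions, positions[1:])]; positions[1:] is drop 1 (exact here)
  List.zipWith (fun a b => b - a) positions (positions.drop 1)

-- ===== PRECONDITION & SPEC =====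
def Spec_bd_to_durs (bd : List Int) (out : List Int) : Prop := out = bd_to_durs_alt bd
instance (bd : List Int) (out : List Int) : Decidable (Spec_bd_to_durs bd out) := by unfold Spec_bd_to_durs; infer_instance

-- ===== CLAIM (what is proved, stated in full; the proofs are below) =====
def Claim_equal_bd_to_durs : Prop := ∀ (bd : List Int), Dom_bd_to_durs bd → Spec_bd_to_durs bd (bd_to_durs bd)

-- ===== LEMMAS AND PROOFS =====

-- durations produced from a list of candidate indices, given the previous boundary `last`
def pvD (bd : List Int) (n : Int) (last : Int) : List Int → List Int
  | [] => [n - last]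
  | i :: rest =>
      if PySem.List.pyGet? bd i = some 1 then (i - last) :: pvD bd n i rest
      else pvD bd n last rest

-- consecutive differences starting from `a`
def pvZ (a : Int) : List Int → List Int
  | [] => []
  | b :: t => (b - a) :: pvZ b t

theorem pvA_loop (bd : List Int) (n : Int) :
    ∀ (l : List Int) (last : Int) (durs : List Int),
      (l.foldl
        (fun (s : Int × List Int) idx =>
          if PySem.List.pyGet? bd idx = some 1 then (idx, s.2 ++ [idx - s.1]) else s)
        (last, durs)).2
      ++ [n - (l.foldl
        (fun (s : Int × List Int) idx =>
          if PySem.List.pyGet? bd idx = some 1 then (idx, s.2 ++ [idx - s.1]) else s)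
        (last, durs)).1]
      = durs ++ pvD bd n last l := by
  intro l
  induction l with
  | nil => intro last durs; simp [pvD]
  | cons i rest ih =>
      intro last durs
      by_cases h : PySem.List.pyGet? bd i = some 1
      · simp [List.foldl, h, pvD, ih]
      · simp [List.foldl, h, pvD, ih]

theorem pvZ_zipWith (t : List Int) :
    ∀ a : Int, List.zipWith (fun a b => b - a) (a :: t) t = pvZ a t := by
  induction t with
  | nil => intro a; simp [pvZ]
  | cons b t ih => intro a; simp [pvZ, ih]

theorem pvZ_filter (bd : List Int) (n : Int) :
    ∀ (l : List Int) (last : Int),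
      pvZ last (l.filter (fun i => PySem.List.pyGet? bd i = some 1) ++ [n]) = pvD bd n last l := by
  intro l
  induction l with
  | nil => intro last; simp [pvZ, pvD]
  | cons i rest ih =>
      intro last
      by_cases h : PySem.List.pyGet? bd i = some 1
      · simp [List.filter, h, pvZ, pvD, ih]
      · simp [List.filter, h, pvD, ih]

-- ===== VERDICT (by name: the statement is the Claim_ definition above) =====
theorem bd_to_durs_spec : Claim_equal_bd_to_durs := by
  intro bd _
  unfold Spec_bd_to_durs bd_to_durs bd_to_durs_alt
  simp only [List.drop_succ_cons, List.drop_zero]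
  rw [pvA_loop bd (bd.length : Int) (PySem.List.pyRange 0 (bd.length : Int) 1) 0 []]
  rw [pvZ_zipWith, pvZ_filter]
  simp
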